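-- pv_equiv track=rewrite | github.com/jmigual/HackUPC2018 | timetable.py | ranges_to_score
-- ===== SOURCE A (Python) =====
-- from typing import List, Tuple, Dict
--
-- def ranges_to_score(ranges: List[List[Tuple[int, int]]], mornings: bool) -> int:
--     empty_days = 0
--     score = 0
--     for day in ranges:
--         if len(day) <= 0:
--             empty_days += 1
--
--         last = None
--         for r_start, r_end in day:
--             day_score = r_end - r_start
--             if not mornings:
--                 day_score = 60*24 - day_score
--
--             score += day_score
--             if last is not None:
--                 score += 4*(r_start - last)
--             last = r_end
--     return score
-- ===== SOURCE B (Python) =====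
-- def ranges_to_score(ranges, mornings):
--     # Global aggregates over the flattened data: no per-day score loop,
--     # no threaded 'last' state.  The per-pair gap sum telescopes, so the
--     # whole score is one closed formula of three independent totals.
--     flat = [r for day in ranges for r in day]
--     total_dur = sum(e - s for s, e in flat)
--     span = sum(day[-1][1] - day[0][0] for day in ranges if day)
--     dur = total_dur if mornings else 1440 * len(flat) - total_dur
--     return dur + 4 * (span - total_dur)
-- ===== Notes on version B (the rewrite author's own statement) =====
-- stated objective: alternative
-- what changed: Replaces A's nested loops threading (score, last) state per interval with staged global aggregates: flatten all days once, compute one total duration, one total per-day span, and combine them in a single closed formula (the gap accumulation telescopes away entirely); the unused empty_days counter is dropped.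
import Mathlib
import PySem

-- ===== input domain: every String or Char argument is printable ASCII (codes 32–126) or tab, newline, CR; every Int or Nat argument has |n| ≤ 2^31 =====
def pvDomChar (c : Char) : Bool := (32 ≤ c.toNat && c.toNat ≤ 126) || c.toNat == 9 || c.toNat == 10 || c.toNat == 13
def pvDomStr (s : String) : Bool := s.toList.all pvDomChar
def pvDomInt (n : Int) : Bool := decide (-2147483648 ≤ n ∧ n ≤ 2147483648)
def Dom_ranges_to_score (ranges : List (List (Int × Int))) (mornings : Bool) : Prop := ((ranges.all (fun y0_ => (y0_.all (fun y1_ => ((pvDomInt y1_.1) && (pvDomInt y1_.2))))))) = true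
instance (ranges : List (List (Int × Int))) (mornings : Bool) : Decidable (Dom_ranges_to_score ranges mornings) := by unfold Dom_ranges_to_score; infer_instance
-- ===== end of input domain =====

-- B replaces A's nested loops threading (score, last) state with staged global aggregates over the
-- flattened data combined in one closed formula (the gap accumulation telescopes away). Objective: alternative.

-- ===== PORT A =====
-- state: (empty_days, score, last : Option Int) threaded exactly as in A
def ranges_to_score (ranges : List (List (Int × Int))) (mornings : Bool) : Int :=
  (ranges.foldl (fun (st : Int × Int) day =>
    let empty_days := if day.length ≤ 0 then st.1 + 1 else st.1
    let inner := day.foldl (fun (p : Option Int × Int) r =>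
        let day_score := r.2 - r.1
        let day_score := if mornings then day_score else 60 * 24 - day_score
        let score := p.2 + day_score
        let score := match p.1 with
          | none => score
          | some last => score + 4 * (r.1 - last)
        (some r.2, score)) ((none : Option Int), st.2)
    (empty_days, inner.2)) ((0 : Int), (0 : Int))).2

-- ===== PORT B =====
def ranges_to_score_alt (ranges : List (List (Int × Int))) (mornings : Bool) : Int :=
  let flat := ranges.flatMap (fun day => day)
  let total_dur := (flat.map (fun r => r.2 - r.1)).sum
  let span := ((ranges.filter (fun day => !day.isEmpty)).map
      (fun day => (day.getLastD (0, 0)).2 - (day.headD (0, 0)).1)).sum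
  let dur := if mornings then total_dur else 1440 * (flat.length : Int) - total_dur
  dur + 4 * (span - total_dur)

-- ===== PRECONDITION & SPEC =====
def Spec_ranges_to_score (ranges : List (List (Int × Int))) (mornings : Bool) (out : Int) : Prop := out = ranges_to_score_alt ranges mornings
instance (ranges : List (List (Int × Int))) (mornings : Bool) (out : Int) : Decidable (Spec_ranges_to_score ranges mornings out) := by unfold Spec_ranges_to_score; infer_instance

-- ===== CLAIM (what is proved, stated in full; the proofs are below) =====
def Claim_equal_ranges_to_score : Prop := ∀ (ranges : List (List (Int × Int))) (mornings : Bool), Dom_ranges_to_score ranges mornings → Spec_ranges_to_score ranges mornings (ranges_to_score ranges mornings)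

-- ===== LEMMAS AND PROOFS =====

-- A's per-day contribution, written as a recursion over the day's ranges with the optional 'last'
def segA (mornings : Bool) : Option Int → List (Int × Int) → Int
  | _, [] => 0
  | l?, (s, e) :: rest =>
      (if mornings then e - s else 60 * 24 - (e - s)) +
      (match l? with | none => 0 | some l => 4 * (s - l)) +
      segA mornings (some e) rest

def lastA : Option Int → List (Int × Int) → Option Int
  | l?, [] => l?
  | _, (_, e) :: rest => lastA (some e) rest

def sumD : List (Int × Int) → Int
  | [] => 0
  | (s, e) :: rest => (e - s) + sumD rest

theorem dur_day (d : List (Int × Int)) : (d.map (fun r => r.2 - r.1)).sum = sumD d := by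
  induction d with
  | nil => simp [sumD]
  | cons h t iht => obtain ⟨a, b⟩ := h; simp [sumD, iht]

def spanD : List (Int × Int) → Int
  | [] => 0
  | (s, e) :: rest => (((s, e) :: rest).getLastD (0, 0)).2 - s

theorem innerA_spec (mornings : Bool) (day : List (Int × Int)) :
    ∀ (l? : Option Int) (sc : Int),
    day.foldl (fun (p : Option Int × Int) r =>
        let day_score := r.2 - r.1
        let day_score := if mornings then day_score else 60 * 24 - day_score
        let score := p.2 + day_score
        let score := match p.1 with
          | none => score
          | some last => score + 4 * (r.1 - last)
        (some r.2, score)) (l?, sc)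
      = (lastA l? day, sc + segA mornings l? day) := by
  induction day with
  | nil => intro l? sc; simp [lastA, segA]
  | cons hd tl ih =>
    intro l? sc
    obtain ⟨s, e⟩ := hd
    simp only [List.foldl_cons, ih, lastA, segA]
    cases l? <;> simp <;> ring

theorem outerA_fold (mornings : Bool) (ranges : List (List (Int × Int))) :
    ∀ (ed sc : Int),
    (ranges.foldl (fun (st : Int × Int) day =>
      ((if day.length ≤ 0 then st.1 + 1 else st.1 : Int), st.2 + segA mornings none day)) (ed, sc)).2
      = sc + (ranges.map (segA mornings none)).sum := by
  induction ranges with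
  | nil => intro ed sc; simp
  | cons day rest ih =>
    intro ed sc
    simp only [List.foldl_cons, List.map_cons, List.sum_cons]
    rw [ih]; ring

theorem segA_shift (mornings : Bool) (s e l : Int) (rest : List (Int × Int)) :
    segA mornings (some l) ((s, e) :: rest) = 4 * (s - l) + segA mornings none ((s, e) :: rest) := by
  simp [segA]; ring

-- per-day closed form: A's day contribution = duration term + 4 * (span − covered)
theorem segA_closed (mornings : Bool) (day : List (Int × Int)) :
    segA mornings none day =
      (if mornings then sumD day else 1440 * (day.length : Int) - sumD day) +
      4 * (spanD day - sumD day) := by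
  induction day with
  | nil => simp [segA, spanD, sumD]
  | cons hd tl ih =>
    obtain ⟨s, e⟩ := hd
    cases tl with
    | nil => cases mornings <;> simp [segA, spanD, sumD]
    | cons hd2 tl2 =>
      obtain ⟨s2, e2⟩ := hd2
      have h1 : segA mornings none ((s, e) :: (s2, e2) :: tl2)
          = (if mornings then e - s else 60 * 24 - (e - s)) + (4 * (s2 - e) + segA mornings none ((s2, e2) :: tl2)) := by
        rw [show segA mornings none ((s, e) :: (s2, e2) :: tl2)
            = (if mornings then e - s else 60 * 24 - (e - s)) + 0 + segA mornings (some e) ((s2, e2) :: tl2) from rfl,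
          segA_shift]
        ring
      have hspan : spanD ((s, e) :: (s2, e2) :: tl2) = spanD ((s2, e2) :: tl2) + (s2 - s) := by
        simp [spanD]
      rw [h1, ih, hspan]
      cases mornings <;> · simp [sumD]; push_cast; ring

-- the flattened duration sum splits into per-day sums
theorem flat_dur (ranges : List (List (Int × Int))) :
    ((ranges.flatMap (fun day => day)).map (fun r => r.2 - r.1)).sum = (ranges.map sumD).sum := by
  induction ranges with
  | nil => simp
  | cons day rest ih =>
    simp [List.flatMap_cons, dur_day, Function.comp_def] at ih ⊢

theorem flat_len (ranges : List (List (Int × Int))) :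
    ((ranges.flatMap (fun day => day)).length : Int) = (ranges.map (fun d => (d.length : Int))).sum := by
  induction ranges with
  | nil => simp
  | cons day rest ih =>
    simp only [List.flatMap_cons, List.length_append, List.map_cons, List.sum_cons]
    push_cast
    rw [ih]

-- the filtered span sum equals the unfiltered sum of spanD (spanD is 0 on empty days)
theorem span_filter (ranges : List (List (Int × Int))) :
    ((ranges.filter (fun day => !day.isEmpty)).map
        (fun day => (day.getLastD (0, 0)).2 - (day.headD (0, 0)).1)).sum
      = (ranges.map spanD).sum := by
  induction ranges with
  | nil => simp
  | cons day rest ih =>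
    cases day with
    | nil => simpa [spanD] using ih
    | cons hd tl =>
      obtain ⟨s, e⟩ := hd
      simp only [List.getLastD_eq_getLast?, List.headD_eq_head?] at ih
      simp [spanD, List.getLastD_eq_getLast?, ih]

-- summing the per-day closed form gives B's three global aggregates
theorem sum_closed (mornings : Bool) (ranges : List (List (Int × Int))) :
    (ranges.map (segA mornings none)).sum =
      (if mornings then (ranges.map sumD).sum
        else 1440 * (ranges.map (fun d => (d.length : Int))).sum - (ranges.map sumD).sum) +
      4 * ((ranges.map spanD).sum - (ranges.map sumD).sum) := by
  induction ranges with
  | nil => cases mornings <;> simp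
  | cons day rest ih =>
    simp only [List.map_cons, List.sum_cons, segA_closed, ih]
    cases mornings <;> simp <;> ring

-- ===== VERDICT (by name: the statement is the Claim_ definition above) =====
theorem ranges_to_score_spec : Claim_equal_ranges_to_score := by
  intro ranges mornings _
  unfold Spec_ranges_to_score ranges_to_score ranges_to_score_alt
  simp only [innerA_spec]
  rw [outerA_fold]
  simp only [flat_dur, flat_len, span_filter, sum_closed]
  cases mornings <;> simp
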